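-- pv_equiv track=rewrite | github.com/Lambchops118/RequiEn | RosettaStoneSorter/RosettaStoneMain.py | word_level_edit_distance
-- ===== SOURCE A (Python) =====
-- def word_level_edit_distance(str1, str2):
--     words1 = str1.lower().split()
--     words2 = str2.lower().split()
--
--     # Get the length of both word lists
--     len1 = len(words1)
--     len2 = len(words2)
--
--     # Create a matrix to store distances
--     dp = [[0 for _ in range(len2 + 1)] for _ in range(len1 + 1)]
--
--     # Initialize the matrix
--     for i in range(len1 + 1):
--         dp[i][0] = i
--     for j in range(len2 + 1):
--         dp[0][j] = j
--
--     # Fill the matrix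
--     for i in range(1, len1 + 1):
--         for j in range(1, len2 + 1):
--             if words1[i - 1] == words2[j - 1]:
--                 dp[i][j] = dp[i - 1][j - 1]
--             else:
--                 # Compute the minimum cost of deletion, insertion, or substitution
--                 dp[i][j] = min(dp[i - 1][j] + 1,
--                                dp[i][j - 1] + 1,
--                                dp[i - 1][j - 1] + 1)
--
--
--     return dp[len1][len2]
-- ===== SOURCE B (Python) =====
-- def word_level_edit_distance(str1, str2):
--     words1 = str1.lower().split()
--     words2 = str2.lower().split()
--     # Top-down memoized recursion: rec(i, j) = edit distance between
--     # words1[:i] and words2[:j], computed on demand and cached in a dict.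
--     memo = {}
--
--     def rec(i, j):
--         if i == 0:
--             return j
--         if j == 0:
--             return i
--         if (i, j) in memo:
--             return memo[(i, j)]
--         if words1[i - 1] == words2[j - 1]:
--             r = rec(i - 1, j - 1)
--         else:
--             r = 1 + min(rec(i - 1, j), rec(i, j - 1), rec(i - 1, j - 1))
--         memo[(i, j)] = r
--         return r
--
--     return rec(len(words1), len(words2))
-- ===== Notes on version B (the rewrite author's own statement) =====
-- stated objective: alternative
-- what changed: Replaces A's bottom-up DP that allocates and fills a full (len1+1)x(len2+1) matrix with top-down demand-driven recursion rec(i,j) memoized in a dict, computing only the subproblems the recursion actually reaches.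
import Mathlib
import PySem

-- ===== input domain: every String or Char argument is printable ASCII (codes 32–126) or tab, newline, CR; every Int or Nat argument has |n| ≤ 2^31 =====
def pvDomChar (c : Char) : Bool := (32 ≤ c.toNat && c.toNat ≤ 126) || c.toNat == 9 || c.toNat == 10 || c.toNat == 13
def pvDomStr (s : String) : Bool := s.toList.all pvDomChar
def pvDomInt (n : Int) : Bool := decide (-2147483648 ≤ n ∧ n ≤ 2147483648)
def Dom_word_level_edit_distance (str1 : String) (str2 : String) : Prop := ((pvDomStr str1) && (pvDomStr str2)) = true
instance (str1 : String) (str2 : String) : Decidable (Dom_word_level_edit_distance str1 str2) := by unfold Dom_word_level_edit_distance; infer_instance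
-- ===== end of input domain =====

-- B replaces A's bottom-up full-matrix DP by top-down memoized recursion (dict-cached rec(i,j)); same asymptotic cost.

-- ===== PORT A =====
-- Literal port of A's bottom-up matrix DP. Python's ranges here have nonnegative
-- bounds, so range(k) is ported as List.range k and range(1, k+1) as List.range' 1 k
-- (exact). Every list read/write in A is at an in-range nonnegative index, so
-- dp[i] / dp[i][j] are ported as getD and assignment as List.set (exact there).
def word_level_edit_distance (str1 : String) (str2 : String) : Int :=
  let words1 := PySem.Str.split₀ (PySem.Str.lower str1)
  let words2 := PySem.Str.split₀ (PySem.Str.lower str2)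
  let len1 := words1.length
  let len2 := words2.length
  -- dp = [[0 for _ in range(len2 + 1)] for _ in range(len1 + 1)]
  let dp : List (List Int) :=
    (List.range (len1 + 1)).map (fun _ => (List.range (len2 + 1)).map (fun _ => (0 : Int)))
  -- for i in range(len1 + 1): dp[i][0] = i
  let dp := (List.range (len1 + 1)).foldl
      (fun dp i => dp.set i ((dp.getD i []).set 0 (i : Int))) dp
  -- for j in range(len2 + 1): dp[0][j] = j
  let dp := (List.range (len2 + 1)).foldl
      (fun dp j => dp.set 0 ((dp.getD 0 []).set j (j : Int))) dp
  -- the fill loops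
  let dp := (List.range' 1 len1).foldl (fun dp i =>
      (List.range' 1 len2).foldl (fun dp j =>
        dp.set i ((dp.getD i []).set j
          (if words1.getD (i - 1) "" == words2.getD (j - 1) "" then
            (dp.getD (i - 1) []).getD (j - 1) 0
          else
            min (min ((dp.getD (i - 1) []).getD j 0 + 1)
                     ((dp.getD i []).getD (j - 1) 0 + 1))
                ((dp.getD (i - 1) []).getD (j - 1) 0 + 1)))) dp) dp
  (dp.getD len1 []).getD len2 0

-- ===== PORT B =====
-- Literal port of B's helper rec(i, j) (Source B): top-down recursion with the memo
-- dict threaded through as state. rec is only ever called with 0 ≤ i ≤ len(words1),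
-- 0 ≤ j ≤ len(words2), so i, j are Nat and words1[i-1] / words2[j-1] are in range,
-- ported as getD (exact there). The memo keys (i, j) are Python int pairs → Int × Int.
def pvRecB (ws1 ws2 : List String) :
    Nat → Nat → PySem.Dict (Int × Int) Int → Int × PySem.Dict (Int × Int) Int
  | 0, j, memo => ((j : Int), memo)
  | i + 1, 0, memo => ((i + 1 : Int), memo)
  | i + 1, j + 1, memo =>
    match memo.get? ((i + 1 : Int), (j + 1 : Int)) with
    | some v => (v, memo)
    | none =>
      let r :=
        if ws1.getD i "" == ws2.getD j "" then
          pvRecB ws1 ws2 i j memo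
        else
          let a := pvRecB ws1 ws2 i (j + 1) memo
          let b := pvRecB ws1 ws2 (i + 1) j a.2
          let c := pvRecB ws1 ws2 i j b.2
          (1 + min (min a.1 b.1) c.1, c.2)
      (r.1, r.2.insert ((i + 1 : Int), (j + 1 : Int)) r.1)
termination_by i j _ => i + j

def word_level_edit_distance_alt (str1 : String) (str2 : String) : Int :=
  let words1 := PySem.Str.split₀ (PySem.Str.lower str1)
  let words2 := PySem.Str.split₀ (PySem.Str.lower str2)
  (pvRecB words1 words2 words1.length words2.length PySem.Dict.empty).1

-- ===== PRECONDITION & SPEC =====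
def Spec_word_level_edit_distance (str1 : String) (str2 : String) (out : Int) : Prop := out = word_level_edit_distance_alt str1 str2
instance (str1 : String) (str2 : String) (out : Int) : Decidable (Spec_word_level_edit_distance str1 str2 out) := by unfold Spec_word_level_edit_distance; infer_instance

-- ===== CLAIM (what is proved, stated in full; the proofs are below) =====
def Claim_equal_word_level_edit_distance : Prop := ∀ (str1 : String) (str2 : String), Dom_word_level_edit_distance str1 str2 → Spec_word_level_edit_distance str1 str2 (word_level_edit_distance str1 str2)

-- ===== LEMMAS AND PROOFS =====

-- the mathematical edit-distance recurrence on prefix lengths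
def edD (ws1 ws2 : List String) : Nat → Nat → Int
  | 0, j => (j : Int)
  | i + 1, 0 => (i + 1 : Int)
  | i + 1, j + 1 =>
    if ws1.getD i "" == ws2.getD j "" then edD ws1 ws2 i j
    else 1 + min (min (edD ws1 ws2 i (j + 1)) (edD ws1 ws2 (i + 1) j)) (edD ws1 ws2 i j)
termination_by i j => i + j

-- memo invariant: every Nat-keyed entry stores the true edit distance
def MemOK (ws1 ws2 : List String) (memo : PySem.Dict (Int × Int) Int) : Prop :=
  ∀ (i j : Nat) (v : Int), memo.get? ((i : Int), (j : Int)) = some v → v = edD ws1 ws2 i j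

theorem memOK_empty (ws1 ws2 : List String) : MemOK ws1 ws2 PySem.Dict.empty := by
  intro i j v h
  simp [PySem.Dict.get?, PySem.Dict.empty] at h

theorem memOK_insert (ws1 ws2 : List String) (memo : PySem.Dict (Int × Int) Int)
    (h : MemOK ws1 ws2 memo) (i j : Nat) :
    MemOK ws1 ws2 (memo.insert ((i : Int), (j : Int)) (edD ws1 ws2 i j)) := by
  intro i' j' v hv
  rw [PySem.Dict.get?_insert] at hv
  split at hv
  · next hk =>
      have hij : i' = i ∧ j' = j := by
        simp only [Prod.mk.injEq, Nat.cast_inj] at hk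
        exact hk
      obtain ⟨h1, h2⟩ := hij
      subst h1; subst h2
      exact ((Option.some.injEq _ _).mp hv).symm
  · exact h i' j' v hv

-- top-down memoized recursion computes edD and preserves the memo invariant
theorem recB_correct (ws1 ws2 : List String) :
    ∀ (n i j : Nat) (memo : PySem.Dict (Int × Int) Int), i + j ≤ n → MemOK ws1 ws2 memo →
      (pvRecB ws1 ws2 i j memo).1 = edD ws1 ws2 i j ∧
        MemOK ws1 ws2 (pvRecB ws1 ws2 i j memo).2 := by
  intro n
  induction n with
  | zero =>
    intro i j memo hn hm
    have hi : i = 0 := by omega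
    subst hi
    exact ⟨by simp [pvRecB, edD], by simp only [pvRecB]; exact hm⟩
  | succ n ih =>
    intro i j memo hn hm
    match i, j with
    | 0, j => exact ⟨by simp [pvRecB, edD], by simp only [pvRecB]; exact hm⟩
    | i + 1, 0 => exact ⟨by simp [pvRecB, edD], by simp only [pvRecB]; exact hm⟩
    | i + 1, j + 1 =>
      have hcast : (((i + 1 : Nat) : Int), ((j + 1 : Nat) : Int)) = ((i : Int) + 1, (j : Int) + 1) := by
        push_cast; rfl
      cases hget : memo.get? ((i : Int) + 1, (j : Int) + 1) with
      | some v =>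
        have e : pvRecB ws1 ws2 (i + 1) (j + 1) memo = (v, memo) := by
          rw [pvRecB, hget]
        rw [e]
        exact ⟨(hm (i + 1) (j + 1) v (by rw [hcast]; exact hget)).symm ▸ rfl, hm⟩
      | none =>
        by_cases heq : (ws1.getD i "" == ws2.getD j "") = true
        · have h0 := ih i j memo (by omega) hm
          have e : pvRecB ws1 ws2 (i + 1) (j + 1) memo =
              ((pvRecB ws1 ws2 i j memo).1,
               (pvRecB ws1 ws2 i j memo).2.insert ((i : Int) + 1, (j : Int) + 1)
                 (pvRecB ws1 ws2 i j memo).1) := by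
            rw [pvRecB, hget, if_pos heq]
          have hred : edD ws1 ws2 (i + 1) (j + 1) = edD ws1 ws2 i j := by
            rw [edD, if_pos heq]
          rw [e]
          refine ⟨by rw [hred]; exact h0.1, ?_⟩
          rw [show ((pvRecB ws1 ws2 i j memo).1 : Int) = edD ws1 ws2 (i + 1) (j + 1) from by
                rw [hred]; exact h0.1,
              ← hcast]
          exact memOK_insert ws1 ws2 _ h0.2 (i + 1) (j + 1)
        · have ha := ih i (j + 1) memo (by omega) hm
          have hb := ih (i + 1) j _ (by omega) ha.2
          have hc := ih i j _ (by omega) hb.2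
          set v1 := 1 + min (min (pvRecB ws1 ws2 i (j + 1) memo).1
                (pvRecB ws1 ws2 (i + 1) j (pvRecB ws1 ws2 i (j + 1) memo).2).1)
                (pvRecB ws1 ws2 i j (pvRecB ws1 ws2 (i + 1) j (pvRecB ws1 ws2 i (j + 1) memo).2).2).1
            with hv1
          have e : pvRecB ws1 ws2 (i + 1) (j + 1) memo =
              (v1, (pvRecB ws1 ws2 i j
                      (pvRecB ws1 ws2 (i + 1) j (pvRecB ws1 ws2 i (j + 1) memo).2).2).2.insert
                    ((i : Int) + 1, (j : Int) + 1) v1) := by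
            rw [pvRecB, hget, if_neg heq]
          have hval : v1 = edD ws1 ws2 (i + 1) (j + 1) := by
            rw [hv1, ha.1, hb.1, hc.1, edD, if_neg heq]
          rw [e]
          refine ⟨hval, ?_⟩
          rw [hval, ← hcast]
          exact memOK_insert ws1 ws2 _ hc.2 (i + 1) (j + 1)

-- ===== A-side characterisation (matrix DP → row recurrence → edD) =====

-- the edit-distance row recurrence, consuming words2 and the previous row from the front
def edRow (w : String) : List String → List Int → Int → List Int
  | [], _, _ => []
  | v :: ws, p, left =>
    let c := if w == v then p.headD 0
             else 1 + min (min ((p.drop 1).headD 0) left) (p.headD 0)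
    c :: edRow w ws (p.drop 1) c

def zerosI (n : Nat) : List Int := List.replicate n 0

def row0I (n : Nat) : List Int := (List.range (n + 1)).map (fun (j : Nat) => (j : Int))

-- rowR ws1 ws2 i = row i of the completely filled DP matrix
def rowR (ws1 ws2 : List String) : Nat → List Int
  | 0 => row0I ws2.length
  | i + 1 => ((i : Int) + 1) :: edRow (ws1.getD i "") ws2 (rowR ws1 ws2 i) ((i : Int) + 1)

theorem getD_eq_headD_drop {α : Type} (d : α) : ∀ (l : List α) (k : Nat), l.getD k d = (l.drop k).headD d := by
  intro l
  induction l with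
  | nil => intro k; cases k <;> simp
  | cons a t ih => intro k; cases k <;> simp only [List.getD_cons_zero, List.drop_zero, List.headD_cons, List.getD_cons_succ, List.drop_succ_cons, ih]

theorem set_getD_self {α : Type} (d : α) (l : List α) (i : Nat) : l.set i (l.getD i d) = l ∨ l.length ≤ i := by
  by_cases h : i < l.length
  · left
    rw [List.getD_eq_getElem?_getD, List.getElem?_eq_getElem h]
    exact List.set_getElem_self h
  · right; omega

theorem edRow_length (w : String) : ∀ (ws : List String) (p : List Int) (left : Int),
    (edRow w ws p left).length = ws.length := by
  intro ws
  induction ws with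
  | nil => simp [edRow]
  | cons v ws ih => intro p left; simp [edRow]; exact ih _ _

-- element k of edRow, in terms of p and the element to its left
theorem edRow_getD (w : String) : ∀ (ws : List String) (p : List Int) (left : Int) (k : Nat),
    k < ws.length →
    (edRow w ws p left).getD k 0 =
      (if w == ws.getD k "" then (p.drop k).headD 0
       else 1 + min (min ((p.drop (k + 1)).headD 0) ((left :: edRow w ws p left).getD k 0))
                    ((p.drop k).headD 0)) := by
  intro ws
  induction ws with
  | nil => intro p left k h; simp at h
  | cons v ws ih =>
    intro p left k h
    cases k with
    | zero => simp [edRow]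
    | succ k =>
      simp only [List.length_cons, Nat.succ_lt_succ_iff] at h
      have := ih (p.drop 1) (if w == v then p.headD 0
             else 1 + min (min ((p.drop 1).headD 0) left) (p.headD 0)) k h
      simp only [edRow, List.getD_cons_succ, List.drop_drop] at *
      rw [this]
      simp only [Nat.add_comm 1]

theorem row0I_getD (n j : Nat) (h : j ≤ n) : (row0I n).getD j 0 = (j : Int) := by
  rw [row0I, List.getD_eq_getElem?_getD, List.getElem?_map, List.getElem?_range (by omega)]
  rfl

-- row i of the filled matrix carries the edit distances edD i ·
theorem rowR_getD_eq (ws1 ws2 : List String) :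
    ∀ (i j : Nat), j ≤ ws2.length → (rowR ws1 ws2 i).getD j 0 = edD ws1 ws2 i j := by
  intro i
  induction i with
  | zero =>
    intro j hj
    rw [show rowR ws1 ws2 0 = row0I ws2.length from rfl, row0I_getD _ _ hj]
    simp [edD]
  | succ i ih =>
    intro j
    induction j with
    | zero => intro _; simp [rowR, edD]
    | succ k ihj =>
      intro hk
      have hkl : k < ws2.length := by omega
      rw [show rowR ws1 ws2 (i + 1)
            = ((i : Int) + 1) :: edRow (ws1.getD i "") ws2 (rowR ws1 ws2 i) ((i : Int) + 1) from rfl,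
          List.getD_cons_succ,
          edRow_getD (ws1.getD i "") ws2 (rowR ws1 ws2 i) ((i : Int) + 1) k hkl]
      have hdiag : ((rowR ws1 ws2 i).drop k).headD 0 = edD ws1 ws2 i k := by
        rw [← getD_eq_headD_drop]; exact ih k (by omega)
      have hup : ((rowR ws1 ws2 i).drop (k + 1)).headD 0 = edD ws1 ws2 i (k + 1) := by
        rw [← getD_eq_headD_drop]; exact ih (k + 1) hk
      have hleft : (((i : Int) + 1) :: edRow (ws1.getD i "") ws2 (rowR ws1 ws2 i) ((i : Int) + 1)).getD k 0
          = edD ws1 ws2 (i + 1) k := by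
        rw [← show rowR ws1 ws2 (i + 1)
            = ((i : Int) + 1) :: edRow (ws1.getD i "") ws2 (rowR ws1 ws2 i) ((i : Int) + 1) from rfl]
        exact ihj (by omega)
      rw [hdiag, hup, hleft, edD]

-- generic: a fold writing cell i as a function of cell i alone, over range' s cnt
theorem foldl_set_self {α : Type} (d : α) (g : Nat → α → α) :
    ∀ (cnt s : Nat) (A : List α), A.length = s + cnt →
    (List.range' s cnt).foldl (fun L i => L.set i (g i (L.getD i d))) A
      = A.take s ++ (List.range' s cnt).map (fun i => g i (A.getD i d)) := by
  intro cnt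
  induction cnt with
  | zero =>
    intro s A h
    simp only [List.range', List.foldl_nil, List.map_nil, List.append_nil]
    exact (List.take_of_length_le (by omega)).symm
  | succ k ih =>
    intro s A h
    rw [List.range'_succ]
    simp only [List.foldl_cons, List.map_cons]
    have hs : s < A.length := by omega
    set A' := A.set s (g s (A.getD s d)) with hA'
    have hlen : A'.length = (s + 1) + k := by simp [hA']; omega
    rw [ih (s + 1) A' hlen]
    have htake : A'.take (s + 1) = A.take s ++ [g s (A.getD s d)] := by
      rw [hA', List.take_set, List.take_add_one, List.set_append]
      simp [List.length_take, Nat.min_eq_left (by omega : s ≤ A.length),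
            List.getElem?_eq_getElem hs]
    have hmap : (List.range' (s + 1) k).map (fun i => g i (A'.getD i d))
        = (List.range' (s + 1) k).map (fun i => g i (A.getD i d)) := by
      apply List.map_congr_left
      intro i hi
      have hne : s ≠ i := by
        have := List.mem_range'_1.mp hi
        omega
      rw [hA', List.getD_eq_getElem?_getD, List.getElem?_set_ne hne, ← List.getD_eq_getElem?_getD]
    rw [hmap, htake]
    simp

-- a fold that only writes row 0
theorem foldl_set_zero {α : Type} (d : α) (h : α → Nat → α) :
    ∀ (J : List Nat) (M : List α), M ≠ [] →
    (J.foldl (fun L j => L.set 0 (h (L.getD 0 d) j)) M)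
      = M.set 0 (J.foldl h (M.getD 0 d)) := by
  intro J
  induction J with
  | nil =>
    intro M hM
    simp only [List.foldl_nil]
    rcases set_getD_self d M 0 with h0 | h0
    · exact h0.symm
    · exact absurd (List.length_pos_iff.mpr hM) (by omega)
  | cons j J ih =>
    intro M hM
    simp only [List.foldl_cons]
    have h0 : 0 < M.length := List.length_pos_iff.mpr hM
    rw [ih _ (by rw [Ne, List.set_eq_nil_iff]; exact hM)]
    have hg : (M.set 0 (h (M.getD 0 d) j)).getD 0 d = h (M.getD 0 d) j := by
      rw [List.getD_eq_getElem?_getD, List.getElem?_set_self h0]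
      rfl
    rw [hg, List.set_set]

-- the inner fill loop over row i equals a row-level fold with the previous row fixed
theorem inner_matrix (w : String) (ws2 : List String) (i : Nat) (hi : 1 ≤ i) :
    ∀ (J : List Nat) (M : List (List Int)),
    (J.foldl (fun dp j => dp.set i ((dp.getD i []).set j
        (if w == ws2.getD (j - 1) "" then (dp.getD (i - 1) []).getD (j - 1) 0
         else min (min ((dp.getD (i - 1) []).getD j 0 + 1) ((dp.getD i []).getD (j - 1) 0 + 1))
                  ((dp.getD (i - 1) []).getD (j - 1) 0 + 1)))) M)
      = M.set i (J.foldl (fun r j => r.set j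
        (if w == ws2.getD (j - 1) "" then (M.getD (i - 1) []).getD (j - 1) 0
         else min (min ((M.getD (i - 1) []).getD j 0 + 1) (r.getD (j - 1) 0 + 1))
                  ((M.getD (i - 1) []).getD (j - 1) 0 + 1))) (M.getD i [])) := by
  intro J
  induction J with
  | nil =>
    intro M
    simp only [List.foldl_nil]
    rcases set_getD_self [] M i with h0 | h0
    · exact h0.symm
    · rw [List.set_eq_of_length_le h0]
  | cons j J ih =>
    intro M
    simp only [List.foldl_cons]
    set v := (if w == ws2.getD (j - 1) "" then (M.getD (i - 1) []).getD (j - 1) 0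
         else min (min ((M.getD (i - 1) []).getD j 0 + 1) ((M.getD i []).getD (j - 1) 0 + 1))
                  ((M.getD (i - 1) []).getD (j - 1) 0 + 1)) with hv
    set M1 := M.set i ((M.getD i []).set j v) with hM1
    rw [ih M1]
    have hprev : M1.getD (i - 1) [] = M.getD (i - 1) [] := by
      rw [hM1, List.getD_eq_getElem?_getD, List.getElem?_set_ne (by omega : i ≠ i - 1),
          ← List.getD_eq_getElem?_getD]
    have hcur : M1.getD i [] = (M.getD i []).set j v := by
      by_cases hlt : i < M.length
      · rw [hM1, List.getD_eq_getElem?_getD, List.getElem?_set_self hlt]; rfl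
      · have hMi : M.getD i [] = [] := by
          rw [List.getD_eq_getElem?_getD, List.getElem?_eq_none (by omega)]; rfl
        rw [hM1, hMi, List.set_nil, List.set_eq_of_length_le (by omega)]
        exact hMi
    have hset : ∀ (r : List Int), M1.set i r = M.set i r := by
      intro r; rw [hM1, List.set_set]
    simp only [hprev, hcur, hset]

-- the row-level fold over range' 1 k builds the edRow prefix
theorem row_fold_eq (w : String) (ws2 : List String) (p : List Int) (i : Int) :
    ∀ (k : Nat), k ≤ ws2.length →
    ((List.range' 1 k).foldl (fun r j => r.set j
        (if w == ws2.getD (j - 1) "" then p.getD (j - 1) 0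
         else min (min (p.getD j 0 + 1) (r.getD (j - 1) 0 + 1)) (p.getD (j - 1) 0 + 1)))
      (i :: zerosI ws2.length))
      = i :: ((edRow w ws2 p i).take k ++ zerosI (ws2.length - k)) := by
  intro k
  induction k with
  | zero => intro _; simp
  | succ k ih =>
    intro hk
    have hkn : k < ws2.length := by omega
    rw [List.range'_concat, List.foldl_append, ih (by omega)]
    simp only [List.foldl_cons, List.foldl_nil]
    have hidx : 1 + 1 * k = k + 1 := by omega
    rw [hidx]
    simp only [Nat.add_sub_cancel]
    set E := edRow w ws2 p i with hE
    have hElen : E.length = ws2.length := edRow_length w ws2 p i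
    have hT : (E.take k).length = k := by rw [List.length_take]; omega
    have hleft : (i :: (E.take k ++ zerosI (ws2.length - k))).getD k 0 = (i :: E).getD k 0 := by
      cases k with
      | zero => simp
      | succ k' =>
        simp only [List.getD_cons_succ]
        rw [List.getD_eq_getElem?_getD, List.getElem?_append_left (by rw [hT]; omega),
            List.getElem?_take, if_pos (by omega), ← List.getD_eq_getElem?_getD]
    have hV : (if w == ws2.getD k "" then p.getD k 0
         else min (min (p.getD (k + 1) 0 + 1)
                       ((i :: (E.take k ++ zerosI (ws2.length - k))).getD k 0 + 1))
                  (p.getD k 0 + 1))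
        = E.getD k 0 := by
      rw [hleft, hE, edRow_getD w ws2 p i k hkn,
          getD_eq_headD_drop 0 p k, getD_eq_headD_drop 0 p (k + 1), ← hE]
      split
      · rfl
      · omega
    rw [List.set_cons_succ, hV]
    congr 1
    have hz : zerosI (ws2.length - k) = 0 :: zerosI (ws2.length - (k + 1)) := by
      have : ws2.length - k = (ws2.length - (k + 1)) + 1 := by omega
      rw [this, zerosI, List.replicate_succ]; rfl
    rw [List.set_append]
    rw [if_neg (by rw [hT]; omega), hT, Nat.sub_self, hz, List.set_cons_zero]
    have htake : E.take (k + 1) = E.take k ++ [E.getD k 0] := by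
      rw [List.take_add_one, List.getElem?_eq_getElem (by omega), List.getD_eq_getElem?_getD,
          List.getElem?_eq_getElem (by omega)]
      rfl
    rw [htake, List.append_assoc]
    rfl

-- foldl_set_self over List.range
theorem foldl_set_self0 {α : Type} (d : α) (g : Nat → α → α) (n : Nat) (A : List α)
    (h : A.length = n) :
    (List.range n).foldl (fun L i => L.set i (g i (L.getD i d))) A
      = (List.range n).map (fun i => g i (A.getD i d)) := by
  rw [List.range_eq_range']
  exact (foldl_set_self d g n 0 A (by omega)).trans (by simp)

-- the matrix after A's two initialisation loops
theorem init_eq (m n : Nat) :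
    ((List.range (n + 1)).foldl (fun dp j => dp.set 0 ((dp.getD 0 []).set j (j : Int)))
      ((List.range (m + 1)).foldl (fun dp i => dp.set i ((dp.getD i []).set 0 (i : Int)))
        ((List.range (m + 1)).map (fun _ => (List.range (n + 1)).map (fun _ => (0 : Int))))))
      = row0I n :: (List.range' 1 m).map (fun (k : Nat) => (k : Int) :: zerosI n) := by
  have hz : ((List.range (n + 1)).map (fun _ => (0 : Int))) = 0 :: zerosI n := by
    rw [List.map_const', List.length_range, List.replicate_succ]; rfl
  have hA0 : ∀ (i : Nat), i < m + 1 →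
      (((List.range (m + 1)).map (fun _ => (List.range (n + 1)).map (fun _ => (0 : Int)))).getD i [])
        = (List.range (n + 1)).map (fun _ => (0 : Int)) := by
    intro i hi
    rw [List.getD_eq_getElem?_getD, List.getElem?_map, List.getElem?_range hi]
    rfl
  have e1 : ((List.range (m + 1)).foldl (fun dp i => dp.set i ((dp.getD i []).set 0 (i : Int)))
        ((List.range (m + 1)).map (fun _ => (List.range (n + 1)).map (fun _ => (0 : Int)))))
      = (List.range (m + 1)).map (fun (i : Nat) => ((0 : Int) :: zerosI n).set 0 (i : Int)) := by
    refine (foldl_set_self0 [] (fun i r => r.set 0 (i : Int)) (m + 1) _ (by simp)).trans ?_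
    apply List.map_congr_left
    intro i hi
    rw [hA0 i (List.mem_range.mp hi), hz]
  rw [e1]
  have hM1 : (List.range (m + 1)).map (fun (i : Nat) => ((0 : Int) :: zerosI n).set 0 (i : Int))
      = (((0 : Int) :: zerosI n).set 0 ((0 : Nat) : Int))
        :: (List.range' 1 m).map (fun (i : Nat) => ((0 : Int) :: zerosI n).set 0 (i : Int)) := by
    rw [List.range_eq_range', List.range'_succ]
    rfl
  have hM1ne : (List.range (m + 1)).map (fun (i : Nat) => ((0 : Int) :: zerosI n).set 0 (i : Int)) ≠ [] := by
    simp
  rw [foldl_set_zero [] (fun r j => r.set j (j : Int)) _ _ hM1ne]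
  have hget0 : ((List.range (m + 1)).map (fun (i : Nat) => ((0 : Int) :: zerosI n).set 0 (i : Int))).getD 0 []
      = ((0 : Int) :: zerosI n).set 0 ((0 : Nat) : Int) := by
    rw [List.getD_eq_getElem?_getD, List.getElem?_map, List.getElem?_range (by omega)]
    rfl
  rw [hget0]
  have hrow0 : (List.range (n + 1)).foldl (fun r j => r.set j (j : Int))
        (((0 : Int) :: zerosI n).set 0 ((0 : Nat) : Int))
      = row0I n := by
    refine (foldl_set_self0 (0 : Int) (fun j _ => (j : Int)) (n + 1) _ (by simp [zerosI])).trans ?_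
    rw [row0I]
  rw [hrow0, hM1, List.set_cons_zero]
  exact congrArg _ (List.map_congr_left (fun a _ => List.set_cons_zero))

-- the matrix after the first i iterations of the fill loop
theorem fill_eq (ws1 ws2 : List String) :
    ∀ (i : Nat), i ≤ ws1.length →
    ((List.range' 1 i).foldl (fun dp i0 =>
        (List.range' 1 ws2.length).foldl (fun dp j =>
          dp.set i0 ((dp.getD i0 []).set j
            (if ws1.getD (i0 - 1) "" == ws2.getD (j - 1) "" then
              (dp.getD (i0 - 1) []).getD (j - 1) 0
            else
              min (min ((dp.getD (i0 - 1) []).getD j 0 + 1)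
                       ((dp.getD i0 []).getD (j - 1) 0 + 1))
                  ((dp.getD (i0 - 1) []).getD (j - 1) 0 + 1)))) dp)
      (row0I ws2.length :: (List.range' 1 ws1.length).map (fun (k : Nat) => (k : Int) :: zerosI ws2.length)))
      = (List.range (i + 1)).map (rowR ws1 ws2)
        ++ (List.range' (i + 1) (ws1.length - i)).map (fun (k : Nat) => (k : Int) :: zerosI ws2.length) := by
  intro i
  induction i with
  | zero =>
    intro _
    simp only [show List.range' 1 0 = [] from rfl, List.foldl_nil,
               show List.range 1 = [0] from rfl, List.map_cons, List.map_nil,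
               Nat.sub_zero, List.singleton_append]
    rfl
  | succ i ih =>
    intro hi
    have hii : i ≤ ws1.length := by omega
    rw [List.range'_concat, List.foldl_append, ih hii]
    simp only [List.foldl_cons, List.foldl_nil]
    rw [show 1 + 1 * i = i + 1 from by omega]
    set Mi := (List.range (i + 1)).map (rowR ws1 ws2)
        ++ (List.range' (i + 1) (ws1.length - i)).map (fun (k : Nat) => (k : Int) :: zerosI ws2.length) with hMi
    rw [inner_matrix (ws1.getD (i + 1 - 1) "") ws2 (i + 1) (by omega) (List.range' 1 ws2.length) Mi]
    have hlen : ((List.range (i + 1)).map (rowR ws1 ws2)).length = i + 1 := by simp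
    have hprev : Mi.getD (i + 1 - 1) [] = rowR ws1 ws2 i := by
      rw [hMi, List.getD_eq_getElem?_getD, List.getElem?_append_left (by rw [hlen]; omega),
          List.getElem?_map, List.getElem?_range (by omega)]
      rfl
    have hmsub : ws1.length - i = (ws1.length - (i + 1)) + 1 := by omega
    have hcurr : Mi.getD (i + 1) [] = ((i + 1 : Nat) : Int) :: zerosI ws2.length := by
      rw [hMi, List.getD_eq_getElem?_getD, List.getElem?_append_right (by rw [hlen]),
          hlen, Nat.sub_self, hmsub, List.range'_succ, List.map_cons]
      rfl
    simp only [hprev, hcurr]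
    rw [row_fold_eq (ws1.getD (i + 1 - 1) "") ws2 (rowR ws1 ws2 i) ((i + 1 : Nat) : Int)
          ws2.length (le_refl _)]
    rw [List.take_of_length_le (by rw [edRow_length]), Nat.sub_self,
        show zerosI 0 = [] from rfl, List.append_nil]
    have hrow : (((i + 1 : Nat) : Int)
          :: edRow (ws1.getD (i + 1 - 1) "") ws2 (rowR ws1 ws2 i) ((i + 1 : Nat) : Int))
        = rowR ws1 ws2 (i + 1) := by
      simp [rowR]
    rw [hrow, hMi, List.set_append, if_neg (by rw [hlen]; omega), hlen, Nat.sub_self,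
        hmsub, List.range'_succ, List.map_cons, List.set_cons_zero]
    simp [List.range_succ]

-- ===== VERDICT (by name: the statement is the Claim_ definition above) =====
theorem word_level_edit_distance_spec : Claim_equal_word_level_edit_distance := by
  intro str1 str2 _
  unfold Spec_word_level_edit_distance
  simp only [word_level_edit_distance, word_level_edit_distance_alt]
  set ws1 := PySem.Str.split₀ (PySem.Str.lower str1) with hws1
  set ws2 := PySem.Str.split₀ (PySem.Str.lower str2) with hws2
  rw [init_eq ws1.length ws2.length]
  rw [fill_eq ws1 ws2 ws1.length (le_refl _)]
  rw [Nat.sub_self]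
  simp only [show List.range' (ws1.length + 1) 0 = [] from rfl, List.map_nil, List.append_nil]
  have hA : ((List.range (ws1.length + 1)).map (rowR ws1 ws2)).getD ws1.length []
      = rowR ws1 ws2 ws1.length := by
    rw [List.getD_eq_getElem?_getD, List.getElem?_map, List.getElem?_range (by omega)]
    rfl
  rw [hA, rowR_getD_eq ws1 ws2 ws1.length ws2.length (le_refl _)]
  exact (recB_correct ws1 ws2 (ws1.length + ws2.length) ws1.length ws2.length
      PySem.Dict.empty (le_refl _) (memOK_empty ws1 ws2)).1.symm
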